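-- pv_equiv track=rewrite | github.com/PrakashDadi/sensd | sensdweb/requests/views.py | compute_reachability_matrix
-- ===== SOURCE A (Python) =====
-- from collections import defaultdict, deque #Used to create dictionaries with default values and double-ended queues
--
-- def compute_reachability_matrix(nodes, arcs, max_steps):
--     # Initialize reachability matrix and adjacency list
--     reachability = defaultdict(lambda: defaultdict(int))
--     adjacency_list = defaultdict(list)
--
--     # Creating adjacency list from arcs
--     for (i, j) in arcs:
--         adjacency_list[i].append(j)
--
--     # Compute Reachability Matrix using Breadth-First Search (BFS)
--     for node in nodes:
--         queue = deque([(node, 0)])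
--         reachability[node][node] = 0
--
--         while queue:
--             current_node, steps = queue.popleft()
--
--             if steps < max_steps:
--                 for neighbor in adjacency_list[current_node]:
--                     if neighbor not in reachability[node] or reachability[node][neighbor] > steps + 1:
--                         reachability[node][neighbor] = steps + 1
--                         queue.append((neighbor, steps + 1))
--
--     return reachability
-- ===== SOURCE B (Python) =====
-- from collections import defaultdict
--
-- def compute_reachability_matrix(nodes, arcs, max_steps):
--     # Level-by-level frontier BFS instead of a deque of (node, steps) pairs.
--     reachability = defaultdict(lambda: defaultdict(int))
--     adjacency_list = defaultdict(list)
--     for (i, j) in arcs: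
--         adjacency_list[i].append(j)
--     for node in nodes:
--         dist = reachability[node]
--         dist[node] = 0
--         frontier = [node]
--         step = 0
--         while frontier and step < max_steps:
--             new_frontier = []
--             for v in frontier:
--                 for nbr in adjacency_list[v]:
--                     if nbr not in dist:
--                         dist[nbr] = step + 1
--                         new_frontier.append(nbr)
--             frontier = new_frontier
--             step += 1
--     return reachability
-- ===== Notes on version B (the rewrite author's own statement) =====
-- stated objective: alternative
-- what changed: Replaces the deque of (node, steps) pairs and its per-entry distance-improvement test with level-by-level frontier-list expansion: each round discovers exactly the not-yet-seen neighbors of the current frontier at distance step+1.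
import Mathlib
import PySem

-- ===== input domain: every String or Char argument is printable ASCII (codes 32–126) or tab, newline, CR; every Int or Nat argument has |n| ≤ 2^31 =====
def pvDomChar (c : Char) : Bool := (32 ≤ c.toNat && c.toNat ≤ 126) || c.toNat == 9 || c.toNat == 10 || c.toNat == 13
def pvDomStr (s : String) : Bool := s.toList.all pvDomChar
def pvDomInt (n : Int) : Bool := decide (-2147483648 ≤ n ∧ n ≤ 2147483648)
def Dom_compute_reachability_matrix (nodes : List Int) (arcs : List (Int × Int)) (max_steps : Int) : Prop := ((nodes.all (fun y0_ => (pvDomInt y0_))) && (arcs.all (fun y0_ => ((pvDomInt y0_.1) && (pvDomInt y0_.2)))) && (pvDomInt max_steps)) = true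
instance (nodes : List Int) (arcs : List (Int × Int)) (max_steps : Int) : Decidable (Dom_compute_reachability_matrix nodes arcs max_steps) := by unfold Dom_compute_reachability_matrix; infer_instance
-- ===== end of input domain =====

-- B replaces A's deque of (node, steps) pairs by level-by-level frontier expansion; same return value.

-- ===== PORT A =====

-- adjacency_list building (identical lines in both Pythons): defaultdict(list) + append
def pvBuildAdj (arcs : List (Int × Int)) : PySem.Dict Int (List Int) :=
  arcs.foldl (fun a ij => a.insert ij.1 (a.getD ij.1 [] ++ [ij.2])) PySem.Dict.empty

-- A's while-loop over the deque; fuel arcs.length + 2 is an upper bound on the pops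
-- (proved along the way: each pop beyond the first corresponds to a fresh discovery of an arc target)
def pvAStep (adj : PySem.Dict Int (List Int)) (m : Int) :
    Nat → List (Int × Int) → PySem.Dict Int Int → PySem.Dict Int Int
  | _, [], d => d
  | 0, _ :: _, d => d
  | fuel+1, (v, s) :: rest, d =>
    if s < m then
      let acc := (adj.getD v []).foldl
        (fun (qd : List (Int × Int) × PySem.Dict Int Int) nbr =>
          if (match qd.2.get? nbr with | none => true | some w => decide (s + 1 < w)) then
            (qd.1 ++ [(nbr, s + 1)], qd.2.insert nbr (s + 1))
          else qd) (rest, d)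
      pvAStep adj m fuel acc.1 acc.2
    else pvAStep adj m fuel rest d

def compute_reachability_matrix (nodes : List Int) (arcs : List (Int × Int)) (max_steps : Int) : List (Int × List (Int × Int)) :=
  let adj := pvBuildAdj arcs
  let reach := nodes.foldl (fun (reach : PySem.Dict Int (PySem.Dict Int Int)) node =>
    let d0 := reach.getD node PySem.Dict.empty
    let d1 := d0.insert node 0
    reach.insert node (pvAStep adj max_steps (arcs.length + 2) [(node, 0)] d1)) PySem.Dict.empty
  reach.items.map (fun p => (p.1, p.2.items))

-- ===== PORT B =====

-- B's inner double loop: expand one frontier node v, accumulating (dist, new_frontier)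
def pvBNode (adj : PySem.Dict Int (List Int)) (s : Int)
    (acc : PySem.Dict Int Int × List Int) (v : Int) : PySem.Dict Int Int × List Int :=
  (adj.getD v []).foldl
    (fun acc nbr => if acc.1.get? nbr = none then (acc.1.insert nbr (s + 1), acc.2 ++ [nbr]) else acc)
    acc

-- B's while loop: fuel = max_steps.toNat counts the remaining allowed steps (step < max_steps)
def pvBLevels (adj : PySem.Dict Int (List Int)) :
    Nat → Int → List Int → PySem.Dict Int Int → PySem.Dict Int Int
  | 0, _, _, d => d
  | fuel+1, s, frontier, d =>
    if frontier = [] then d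
    else
      let acc := frontier.foldl (pvBNode adj s) (d, [])
      pvBLevels adj fuel (s + 1) acc.2 acc.1

def compute_reachability_matrix_alt (nodes : List Int) (arcs : List (Int × Int)) (max_steps : Int) : List (Int × List (Int × Int)) :=
  let adj := pvBuildAdj arcs
  let reach := nodes.foldl (fun (reach : PySem.Dict Int (PySem.Dict Int Int)) node =>
    let d0 := reach.getD node PySem.Dict.empty
    let d1 := d0.insert node 0
    reach.insert node (pvBLevels adj max_steps.toNat 0 [node] d1)) PySem.Dict.empty
  reach.items.map (fun p => (p.1, p.2.items))

-- ===== PRECONDITION & SPEC =====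
def Spec_compute_reachability_matrix (nodes : List Int) (arcs : List (Int × Int)) (max_steps : Int) (out : List (Int × List (Int × Int))) : Prop := out = compute_reachability_matrix_alt nodes arcs max_steps
instance (nodes : List Int) (arcs : List (Int × Int)) (max_steps : Int) (out : List (Int × List (Int × Int))) : Decidable (Spec_compute_reachability_matrix nodes arcs max_steps out) := by unfold Spec_compute_reachability_matrix; infer_instance

-- ===== CLAIM (what is proved, stated in full; the proofs are below) =====
def Claim_equal_compute_reachability_matrix : Prop := ∀ (nodes : List Int) (arcs : List (Int × Int)) (max_steps : Int), Dom_compute_reachability_matrix nodes arcs max_steps → Spec_compute_reachability_matrix nodes arcs max_steps (compute_reachability_matrix nodes arcs max_steps)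

-- ===== LEMMAS AND PROOFS =====

-- values of d bounded by b
def pvInv (d : PySem.Dict Int Int) (b : Int) : Prop := ∀ k v, d.get? k = some v → v ≤ b

-- arcs whose target is not yet a key (fuel bookkeeping)
def pvT (arcs : List (Int × Int)) (d : PySem.Dict Int Int) : Nat :=
  (arcs.filter (fun a => (d.get? a.2).isNone)).length

theorem pvInv_insert (d : PySem.Dict Int Int) (b k v : Int)
    (hinv : pvInv d b) (hv : v ≤ b) : pvInv (d.insert k v) b := by
  intro k' v' h
  rw [PySem.Dict.get?_insert] at h
  split at h
  · cases h; omega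
  · exact hinv k' v' h

theorem pvBuildAdj_mem_aux (arcs l : List (Int × Int)) (a : PySem.Dict Int (List Int))
    (ha : ∀ v nbr, nbr ∈ a.getD v [] → (v, nbr) ∈ arcs) (hl : ∀ p ∈ l, p ∈ arcs) :
    ∀ v nbr, nbr ∈ (l.foldl (fun a ij => a.insert ij.1 (a.getD ij.1 [] ++ [ij.2])) a).getD v [] → (v, nbr) ∈ arcs := by
  induction l generalizing a with
  | nil => exact ha
  | cons ij tl ih =>
    intro v nbr h
    refine ih _ ?_ (fun p hp => hl p (List.mem_cons_of_mem _ hp)) v nbr h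
    intro v' nbr' h'
    beta_reduce at h'
    by_cases hv : v' = ij.1
    · subst hv
      rw [PySem.Dict.getD_insert_self] at h'
      rcases List.mem_append.mp h' with h2 | h2
      · exact ha _ _ h2
      · simp only [List.mem_singleton] at h2
        subst h2
        exact hl ij List.mem_cons_self
    · rw [PySem.Dict.getD_insert_of_ne _ _ _ hv] at h'
      exact ha _ _ h'

theorem pvBuildAdj_mem (arcs : List (Int × Int)) (v nbr : Int)
    (h : nbr ∈ (pvBuildAdj arcs).getD v []) : (v, nbr) ∈ arcs := by
  refine pvBuildAdj_mem_aux arcs arcs PySem.Dict.empty ?_ (fun p hp => hp) v nbr h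
  intro v' nbr' h'
  simp [PySem.Dict.getD_empty] at h' 

theorem pvT_insert_aux (d : PySem.Dict Int Int) (w x : Int) (hw : d.get? w = none) :
    ∀ (l : List (Int × Int)), (∃ u, (u, w) ∈ l) →
    (l.filter (fun a => ((d.insert w x).get? a.2).isNone)).length + 1
      ≤ (l.filter (fun a => (d.get? a.2).isNone)).length := by
  intro l
  induction l with
  | nil => rintro ⟨u, hu⟩; cases hu
  | cons a tl ih =>
    rintro ⟨u, hu⟩
    have hsub : (tl.filter (fun a => ((d.insert w x).get? a.2).isNone)).length
        ≤ (tl.filter (fun a => (d.get? a.2).isNone)).length := by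
      rw [← List.countP_eq_length_filter, ← List.countP_eq_length_filter]
      apply List.countP_mono_left
      intro p _ hp
      rw [PySem.Dict.get?_insert] at hp
      split at hp
      · simp at hp
      · exact hp
    by_cases haw : a.2 = w
    · have h1 : ((d.insert w x).get? a.2).isNone = false := by
        rw [haw, PySem.Dict.get?_insert_self]; rfl
      have h2 : (d.get? a.2).isNone = true := by rw [haw, hw]; rfl
      simp only [List.filter_cons, h1, h2]
      simpa using Nat.add_le_add_right hsub 1
    · have hne : a ≠ (u, w) := by intro he; apply haw; rw [he]
      have htl : (u, w) ∈ tl := by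
        rcases List.mem_cons.mp hu with h | h
        · exact absurd h.symm (Ne.symm hne ∘ Eq.symm)
        · exact h
      have := ih ⟨u, htl⟩
      simp only [List.filter_cons]
      have hsame : ((d.insert w x).get? a.2).isNone = (d.get? a.2).isNone := by
        rw [PySem.Dict.get?_insert_of_ne _ _ haw]
      rw [hsame]
      split <;> first | (simp only [List.length_cons]; omega) | omega

theorem pvT_insert (arcs : List (Int × Int)) (d : PySem.Dict Int Int) (u w x : Int)
    (hw : d.get? w = none) (hm : (u, w) ∈ arcs) :
    pvT arcs (d.insert w x) + 1 ≤ pvT arcs d :=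
  pvT_insert_aux d w x hw arcs ⟨u, hm⟩

-- one pvBNode fold: correspondence with A's neighbor loop, plus side facts
theorem pvBNode_fold (m s : Int) (hs : s < m) (nbrs : List Int)
    (d : PySem.Dict Int Int) (rest : List (Int × Int)) (nf : List Int)
    (hinv : pvInv d (s + 1)) :
    nbrs.foldl
      (fun (qd : List (Int × Int) × PySem.Dict Int Int) nbr =>
        if (match qd.2.get? nbr with | none => true | some w => decide (s + 1 < w)) then
          (qd.1 ++ [(nbr, s + 1)], qd.2.insert nbr (s + 1))
        else qd) (rest ++ nf.map (fun x => (x, s + 1)), d)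
    = (rest ++ ((nbrs.foldl
        (fun acc nbr => if acc.1.get? nbr = none then (acc.1.insert nbr (s + 1), acc.2 ++ [nbr]) else acc)
        (d, nf)).2).map (fun x => (x, s + 1)),
       (nbrs.foldl
        (fun acc nbr => if acc.1.get? nbr = none then (acc.1.insert nbr (s + 1), acc.2 ++ [nbr]) else acc)
        (d, nf)).1) := by
  induction nbrs generalizing d rest nf with
  | nil => rfl
  | cons nbr tl ih =>
    simp only [List.foldl_cons]
    cases h : d.get? nbr with
    | none =>
      have hq : rest ++ nf.map (fun x => (x, s + 1)) ++ [(nbr, s + 1)]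
          = rest ++ ((nf ++ [nbr]).map (fun x => (x, s + 1))) := by
        simp [List.append_assoc]
      simp only [h, decide_true, if_pos, reduceIte]
      rw [hq]
      exact ih (d.insert nbr (s + 1)) rest (nf ++ [nbr]) (pvInv_insert d (s+1) nbr (s+1) hinv le_rfl)
    | some w =>
      have hw : ¬ (s + 1 < w) := by have := hinv nbr w h; omega
      simp only [h, hw, decide_eq_true_eq, reduceIte, reduceCtorEq, if_neg, decide_false,
        Bool.false_eq_true, not_false_eq_true]
      exact ih d rest nf hinv

theorem pvBNodeFold_inv (s : Int) (nbrs : List Int) (d : PySem.Dict Int Int) (nf : List Int)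
    (hinv : pvInv d (s + 1)) :
    pvInv (nbrs.foldl
        (fun acc nbr => if acc.1.get? nbr = none then (acc.1.insert nbr (s + 1), acc.2 ++ [nbr]) else acc)
        (d, nf)).1 (s + 1) := by
  induction nbrs generalizing d nf with
  | nil => exact hinv
  | cons nbr tl ih =>
    simp only [List.foldl_cons]
    cases h : d.get? nbr with
    | none =>
      simp only [h, reduceIte]
      exact ih (d.insert nbr (s + 1)) (nf ++ [nbr]) (pvInv_insert d (s+1) nbr (s+1) hinv le_rfl)
    | some w =>
      simp only [h, reduceCtorEq, reduceIte]
      exact ih d nf hinv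

theorem pvBNodeFold_mono (s : Int) (nbrs : List Int) (d : PySem.Dict Int Int) (nf : List Int)
    (k v : Int) (h : d.get? k = some v) :
    (nbrs.foldl
        (fun acc nbr => if acc.1.get? nbr = none then (acc.1.insert nbr (s + 1), acc.2 ++ [nbr]) else acc)
        (d, nf)).1.get? k = some v := by
  induction nbrs generalizing d nf with
  | nil => exact h
  | cons nbr tl ih =>
    simp only [List.foldl_cons]
    cases hn : d.get? nbr with
    | none =>
      simp only [hn, reduceIte]
      refine ih (d.insert nbr (s + 1)) (nf ++ [nbr]) ?_
      have hk : k ≠ nbr := by intro he; rw [he, hn] at h; cases h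
      rw [PySem.Dict.get?_insert_of_ne _ _ hk]
      exact h
    | some w =>
      simp only [hn, reduceCtorEq, reduceIte]
      exact ih d nf h

theorem pvBNodeFold_T (arcs : List (Int × Int)) (u s : Int) (nbrs : List Int)
    (hsub : ∀ nbr ∈ nbrs, (u, nbr) ∈ arcs)
    (d : PySem.Dict Int Int) (nf : List Int) :
    pvT arcs (nbrs.foldl
        (fun acc nbr => if acc.1.get? nbr = none then (acc.1.insert nbr (s + 1), acc.2 ++ [nbr]) else acc)
        (d, nf)).1
      + ((nbrs.foldl
        (fun acc nbr => if acc.1.get? nbr = none then (acc.1.insert nbr (s + 1), acc.2 ++ [nbr]) else acc)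
        (d, nf)).2).length ≤ pvT arcs d + nf.length := by
  induction nbrs generalizing d nf with
  | nil => exact le_rfl
  | cons nbr tl ih =>
    simp only [List.foldl_cons]
    cases hn : d.get? nbr with
    | none =>
      simp only [hn, reduceIte]
      have h1 := pvT_insert arcs d u nbr (s + 1) hn (hsub nbr List.mem_cons_self)
      have h2 := ih (fun x hx => hsub x (List.mem_cons_of_mem _ hx)) (d.insert nbr (s + 1)) (nf ++ [nbr])
      simp only [List.length_append, List.length_cons, List.length_nil] at h2 ⊢
      omega
    | some w =>
      simp only [hn, reduceCtorEq, reduceIte]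
      exact ih (fun x hx => hsub x (List.mem_cons_of_mem _ hx)) d nf

theorem pvBNodeFold_covers (s : Int) (nbrs : List Int) (d : PySem.Dict Int Int) (nf : List Int)
    (hinv : pvInv d (s + 1)) (nbr : Int) (h : nbr ∈ nbrs) :
    ∃ v, (nbrs.foldl
        (fun acc nbr => if acc.1.get? nbr = none then (acc.1.insert nbr (s + 1), acc.2 ++ [nbr]) else acc)
        (d, nf)).1.get? nbr = some v ∧ v ≤ s + 1 := by
  induction nbrs generalizing d nf with
  | nil => cases h
  | cons nbr0 tl ih =>
    simp only [List.foldl_cons]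
    rcases List.mem_cons.mp h with he | ht
    · subst he
      cases hn : d.get? nbr with
      | none =>
        simp only [hn, reduceIte]
        exact ⟨s + 1, pvBNodeFold_mono s tl _ _ nbr (s+1) (PySem.Dict.get?_insert_self _ _ _), le_rfl⟩
      | some w =>
        simp only [hn, reduceCtorEq, reduceIte]
        exact ⟨w, pvBNodeFold_mono s tl d nf nbr w hn, hinv nbr w hn⟩
    · cases hn : d.get? nbr0 with
      | none =>
        simp only [hn, reduceIte]
        exact ih _ _ (pvInv_insert d (s+1) nbr0 (s+1) hinv le_rfl) ht
      | some w =>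
        simp only [hn, reduceCtorEq, reduceIte]
        exact ih _ _ hinv ht

-- frontier-level versions
theorem pvBExpand_inv (adj : PySem.Dict Int (List Int)) (s : Int) (frontier : List Int)
    (d : PySem.Dict Int Int) (nf : List Int) (hinv : pvInv d (s + 1)) :
    pvInv (frontier.foldl (pvBNode adj s) (d, nf)).1 (s + 1) := by
  induction frontier generalizing d nf with
  | nil => exact hinv
  | cons v tl ih =>
    simp only [List.foldl_cons]
    have h1 : pvInv (pvBNode adj s (d, nf) v).1 (s + 1) := pvBNodeFold_inv s _ d nf hinv
    have := ih (pvBNode adj s (d, nf) v).1 (pvBNode adj s (d, nf) v).2 h1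
    simpa using this

theorem pvBExpand_mono (adj : PySem.Dict Int (List Int)) (s : Int) (frontier : List Int)
    (d : PySem.Dict Int Int) (nf : List Int) (k v : Int) (h : d.get? k = some v) :
    (frontier.foldl (pvBNode adj s) (d, nf)).1.get? k = some v := by
  induction frontier generalizing d nf with
  | nil => exact h
  | cons v0 tl ih =>
    simp only [List.foldl_cons]
    have h1 : (pvBNode adj s (d, nf) v0).1.get? k = some v := pvBNodeFold_mono s _ d nf k v h
    have := ih (pvBNode adj s (d, nf) v0).1 (pvBNode adj s (d, nf) v0).2 h1
    simpa using this

theorem pvBExpand_T (arcs : List (Int × Int)) (s : Int) (frontier : List Int)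
    (d : PySem.Dict Int Int) (nf : List Int) :
    pvT arcs (frontier.foldl (pvBNode (pvBuildAdj arcs) s) (d, nf)).1
      + ((frontier.foldl (pvBNode (pvBuildAdj arcs) s) (d, nf)).2).length
      ≤ pvT arcs d + nf.length := by
  induction frontier generalizing d nf with
  | nil => exact le_rfl
  | cons v tl ih =>
    simp only [List.foldl_cons]
    have h1 := pvBNodeFold_T arcs v s ((pvBuildAdj arcs).getD v [])
      (fun nbr hn => pvBuildAdj_mem arcs v nbr hn) d nf
    have h2 := ih (pvBNode (pvBuildAdj arcs) s (d, nf) v).1 (pvBNode (pvBuildAdj arcs) s (d, nf) v).2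
    simp only [Prod.mk.eta] at h2
    calc _ ≤ pvT arcs (pvBNode (pvBuildAdj arcs) s (d, nf) v).1
            + ((pvBNode (pvBuildAdj arcs) s (d, nf) v).2).length := h2
      _ ≤ pvT arcs d + nf.length := h1

-- A drops a queue whose steps are all ≥ m without touching d
theorem pvAStep_drop (adj : PySem.Dict Int (List Int)) (m : Int) (fuel : Nat)
    (q : List (Int × Int)) (d : PySem.Dict Int Int) (h : ∀ p ∈ q, ¬ p.2 < m) :
    pvAStep adj m fuel q d = d := by
  induction q generalizing fuel with
  | nil => cases fuel <;> rfl
  | cons p rest ih =>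
    cases fuel with
    | zero => rfl
    | succ fuel =>
      obtain ⟨v, s⟩ := p
      have hns : ¬ s < m := h (v, s) List.mem_cons_self
      simp only [pvAStep, if_neg hns]
      exact ih fuel (fun p hp => h p (List.mem_cons_of_mem _ hp))

-- one level of A = one pvBNode fold over the pending frontier
theorem pvAStep_level (arcs : List (Int × Int)) (m s : Int) (hs : s < m)
    (pend : List Int) (nxt : List Int) (d : PySem.Dict Int Int) (f : Nat)
    (hinv : pvInv d (s + 1)) :
    pvAStep (pvBuildAdj arcs) m (pend.length + f)
        (pend.map (fun x => (x, s)) ++ nxt.map (fun x => (x, s + 1))) d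
      = pvAStep (pvBuildAdj arcs) m f
          (((pend.foldl (pvBNode (pvBuildAdj arcs) s) (d, nxt)).2).map (fun x => (x, s + 1)))
          (pend.foldl (pvBNode (pvBuildAdj arcs) s) (d, nxt)).1 := by
  induction pend generalizing nxt d f with
  | nil => simp
  | cons v ps ih =>
    have hfuel : (v :: ps).length + f = (ps.length + f) + 1 := by
      simp only [List.length_cons]; omega
    rw [hfuel]
    simp only [List.map_cons, List.cons_append, List.foldl_cons]
    rw [pvAStep]
    rw [if_pos hs]
    have hfold := pvBNode_fold m s hs ((pvBuildAdj arcs).getD v []) d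
      (ps.map (fun x => (x, s))) nxt hinv
    simp only [hfold]
    have hinv' : pvInv (pvBNode (pvBuildAdj arcs) s (d, nxt) v).1 (s + 1) :=
      pvBNodeFold_inv s _ d nxt hinv
    have := ih (pvBNode (pvBuildAdj arcs) s (d, nxt) v).2
      (pvBNode (pvBuildAdj arcs) s (d, nxt) v).1 f hinv'
    simpa [pvBNode] using this

-- the main simulation: A's queue loop = B's level loop
theorem pvMain (arcs : List (Int × Int)) (m : Int) (t : Nat) :
    ∀ (s : Int) (frontier : List Int) (d : PySem.Dict Int Int) (f : Nat),
    (m - s).toNat = t → pvInv d (s + 1) →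
    pvAStep (pvBuildAdj arcs) m (frontier.length + pvT arcs d + f)
        (frontier.map (fun x => (x, s))) d
      = pvBLevels (pvBuildAdj arcs) t s frontier d := by
  induction t with
  | zero =>
    intro s frontier d f ht hinv
    have hm : ¬ s < m := by omega
    rw [show pvBLevels (pvBuildAdj arcs) 0 s frontier d = d from rfl]
    apply pvAStep_drop
    intro p hp
    obtain ⟨x, _, hx⟩ := List.mem_map.mp hp
    rw [← hx]
    exact hm
  | succ t iht =>
    intro s frontier d f ht hinv
    have hs : s < m := by omega
    cases hf : frontier with
    | nil =>
      rw [pvBLevels]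
      simp only [reduceIte, List.map_nil, List.length_nil, Nat.zero_add]
      exact pvAStep_drop _ m _ [] d (by intro p hp; cases hp)
    | cons v tl =>
      subst hf
      have hlevel := pvAStep_level arcs m s hs (v :: tl) [] d (pvT arcs d + f) hinv
      simp only [List.map_nil, List.append_nil] at hlevel
      rw [← Nat.add_assoc] at hlevel
      rw [hlevel]
      have hT := pvBExpand_T arcs s (v :: tl) d []
      simp only [List.length_nil, Nat.add_zero] at hT
      set B := (v :: tl).foldl (pvBNode (pvBuildAdj arcs) s) (d, []) with hB
      have hinv' : pvInv B.1 (s + 1 + 1) := by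
        intro k w hw
        have := pvBExpand_inv (pvBuildAdj arcs) s (v :: tl) d [] hinv k w hw
        omega
      have hfuel : pvT arcs d + f = B.2.length + pvT arcs B.1 + (pvT arcs d + f - B.2.length - pvT arcs B.1) := by
        omega
      rw [hfuel]
      rw [iht (s + 1) B.2 B.1 (pvT arcs d + f - B.2.length - pvT arcs B.1) (by omega) hinv']
      rw [pvBLevels]
      simp only [hB, List.foldl_cons, reduceCtorEq, reduceIte]

-- duplicate-source runs are no-ops on both sides
theorem pvBLevels_mono (adj : PySem.Dict Int (List Int)) (t : Nat) :
    ∀ (s : Int) (frontier : List Int) (d : PySem.Dict Int Int) (k v : Int),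
    d.get? k = some v → (pvBLevels adj t s frontier d).get? k = some v := by
  induction t with
  | zero => intro s frontier d k v h; exact h
  | succ t ih =>
    intro s frontier d k v h
    rw [pvBLevels]
    split
    · exact h
    · have h1 : (frontier.foldl (pvBNode adj s) (d, [])).1.get? k = some v :=
        pvBExpand_mono adj s frontier d [] k v h
      exact ih (s + 1) _ _ k v h1

theorem pvFresh_eq (arcs : List (Int × Int)) (m : Int) (node : Int) :
    pvAStep (pvBuildAdj arcs) m (arcs.length + 2) [(node, 0)]
        ((PySem.Dict.empty : PySem.Dict Int Int).insert node 0)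
      = pvBLevels (pvBuildAdj arcs) m.toNat 0 [node]
        ((PySem.Dict.empty : PySem.Dict Int Int).insert node 0) := by
  have hinv : pvInv ((PySem.Dict.empty : PySem.Dict Int Int).insert node 0) (0 + 1) := by
    intro k v h
    rw [PySem.Dict.get?_insert] at h
    split at h
    · cases h; omega
    · rw [PySem.Dict.get?_empty] at h; cases h
  have hT : pvT arcs ((PySem.Dict.empty : PySem.Dict Int Int).insert node 0) ≤ arcs.length := by
    unfold pvT
    exact List.length_filter_le _ _
  have hmain := pvMain arcs m m.toNat 0 [node]
    ((PySem.Dict.empty : PySem.Dict Int Int).insert node 0)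
    (arcs.length + 1 - pvT arcs ((PySem.Dict.empty : PySem.Dict Int Int).insert node 0))
    (by omega) hinv
  simp only [List.length_cons, List.length_nil, List.map_cons, List.map_nil] at hmain
  rw [← hmain]
  congr 1
  omega

-- the per-source BFS result (B's form)
def pvRun (arcs : List (Int × Int)) (m : Int) (node : Int) : PySem.Dict Int Int :=
  pvBLevels (pvBuildAdj arcs) m.toNat 0 [node] ((PySem.Dict.empty : PySem.Dict Int Int).insert node 0)

theorem pvRun_get_node (arcs : List (Int × Int)) (m : Int) (node : Int) :
    (pvRun arcs m node).get? node = some 0 :=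
  pvBLevels_mono (pvBuildAdj arcs) m.toNat 0 [node] _ node 0 (PySem.Dict.get?_insert_self _ _ _)

theorem pvBFold_nodup (s : Int) (nbrs : List Int) (d : PySem.Dict Int Int) (nf : List Int)
    (h : d.keys.Nodup) :
    ((nbrs.foldl
      (fun acc nbr => if acc.1.get? nbr = none then (acc.1.insert nbr (s + 1), acc.2 ++ [nbr]) else acc)
      (d, nf)).1).keys.Nodup := by
  induction nbrs generalizing d nf with
  | nil => exact h
  | cons nbr tl ih =>
    simp only [List.foldl_cons]
    cases hn : d.get? nbr with
    | none =>
      simp only [hn, reduceIte]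
      exact ih _ _ (PySem.Dict.nodup_keys_insert _ _ _ h)
    | some w =>
      simp only [hn, reduceCtorEq, reduceIte]
      exact ih _ _ h

theorem pvBExpand_nodup (adj : PySem.Dict Int (List Int)) (s : Int) (frontier : List Int)
    (d : PySem.Dict Int Int) (nf : List Int) (h : d.keys.Nodup) :
    ((frontier.foldl (pvBNode adj s) (d, nf)).1).keys.Nodup := by
  induction frontier generalizing d nf with
  | nil => exact h
  | cons v tl ih =>
    simp only [List.foldl_cons]
    have h1 := pvBFold_nodup s ((adj.getD v [])) d nf h
    have := ih (pvBNode adj s (d, nf) v).1 (pvBNode adj s (d, nf) v).2 h1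
    simpa using this

theorem pvBLevels_nodup (adj : PySem.Dict Int (List Int)) (t : Nat) :
    ∀ (s : Int) (frontier : List Int) (d : PySem.Dict Int Int),
    d.keys.Nodup → (pvBLevels adj t s frontier d).keys.Nodup := by
  induction t with
  | zero => intro s frontier d h; exact h
  | succ t ih =>
    intro s frontier d h
    rw [pvBLevels]
    split
    · exact h
    · exact ih (s + 1) _ _ (pvBExpand_nodup adj s frontier d [] h)

theorem pvRun_nodup (arcs : List (Int × Int)) (m : Int) (node : Int) :
    (pvRun arcs m node).keys.Nodup := by
  apply pvBLevels_nodup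
  apply PySem.Dict.nodup_keys_insert
  exact PySem.Dict.nodup_keys_empty

-- re-inserting a present key with its present value leaves the dict unchanged
theorem pvMapIf_eq_self (k v : Int) : ∀ (l : List (Int × Int)),
    (l.map Prod.fst).Nodup → l.find? (fun p => p.1 == k) = some (k, v) →
    l.map (fun p => if p.1 == k then (k, v) else p) = l := by
  intro l
  induction l with
  | nil => intro _ h; cases h
  | cons p tl ih =>
    intro hnd hf
    simp only [List.map_cons, List.nodup_cons] at hnd
    by_cases hpk : p.1 = k
    · have hb : (p.1 == k) = true := by simp [hpk]
      simp only [List.find?_cons, hb] at hf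
      cases hf
      simp only [List.map_cons, hb, reduceIte]
      congr 1
      have : ∀ q ∈ tl, (fun p => if p.1 == k then (k, v) else p) q = id q := by
        intro q hq
        have hq1 : q.1 ≠ k := by
          intro he
          apply hnd.1
          simpa [he, hpk] using List.mem_map_of_mem (f := Prod.fst) hq
        simp [hq1]
      rw [List.map_congr_left this, List.map_id]
    · have hb : (p.1 == k) = false := by simp [hpk]
      simp only [List.find?_cons, hb] at hf
      simp only [List.map_cons, hb, Bool.false_eq_true, reduceIte]
      rw [ih hnd.2 hf]

theorem pvInsert_same (d : PySem.Dict Int Int) (k v : Int)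
    (h : d.get? k = some v) (hnd : d.keys.Nodup) : d.insert k v = d := by
  have hc : d.contains k = true := by
    rw [PySem.Dict.contains_eq_isSome_get?, h]; rfl
  obtain ⟨p0, hp0, hp2⟩ : ∃ p0, d.items.find? (fun p => p.1 == k) = some p0 ∧ p0.2 = v := by
    unfold PySem.Dict.get? at h
    cases hf : List.find? (fun p => p.1 == k) d.items with
    | none => rw [hf] at h; cases h
    | some p0 => rw [hf] at h; exact ⟨p0, rfl, by cases h; rfl⟩
  have hp1 : p0.1 = k := by
    have := List.find?_some hp0
    simpa using this
  have hpe : p0 = (k, v) := by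
    obtain ⟨a, b⟩ := p0
    simp only at hp1 hp2
    rw [hp1, hp2]
  apply PySem.Dict.ext
  simp only [PySem.Dict.insert, hc, reduceIte]
  exact pvMapIf_eq_self k v d.items hnd (hpe ▸ hp0)

-- A's run from an already-completed source dict is a no-op
theorem pvAFold_noop (R : PySem.Dict Int Int) (ns : List Int)
    (h : ∀ nbr ∈ ns, ∃ v, R.get? nbr = some v ∧ v ≤ 1) :
    ∀ (q : List (Int × Int)),
    ns.foldl
      (fun (qd : List (Int × Int) × PySem.Dict Int Int) nbr =>
        if (match qd.2.get? nbr with | none => true | some w => decide ((0:Int) + 1 < w)) then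
          (qd.1 ++ [(nbr, (0:Int) + 1)], qd.2.insert nbr ((0:Int) + 1))
        else qd) (q, R) = (q, R) := by
  induction ns with
  | nil => intro q; rfl
  | cons nbr tl ih =>
    intro q
    obtain ⟨v, hv, hv1⟩ := h nbr List.mem_cons_self
    have hc : ¬ ((0:Int) + 1 < v) := by omega
    simp only [List.foldl_cons, hv, hc, decide_false, Bool.false_eq_true, reduceIte]
    exact ih (fun x hx => h x (List.mem_cons_of_mem _ hx)) q

theorem pvAStep_noop (arcs : List (Int × Int)) (m : Int) (node : Int) (R : PySem.Dict Int Int)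
    (hcov : 0 < m → ∀ nbr ∈ (pvBuildAdj arcs).getD node [], ∃ v, R.get? nbr = some v ∧ v ≤ 1) :
    pvAStep (pvBuildAdj arcs) m (arcs.length + 2) [(node, 0)] R = R := by
  have he : arcs.length + 2 = (arcs.length + 1) + 1 := rfl
  rw [he, pvAStep]
  by_cases hm : (0:Int) < m
  · rw [if_pos hm]
    have := pvAFold_noop R ((pvBuildAdj arcs).getD node []) (hcov hm) []
    simp only [this]
    rfl
  · rw [if_neg hm]
    rfl

-- B's run from an already-completed source dict is a no-op
theorem pvBFold_noop (s : Int) (R : PySem.Dict Int Int)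
    (ns : List Int) (h : ∀ nbr ∈ ns, (R.get? nbr).isSome) (nf : List Int) :
    ns.foldl
      (fun acc nbr => if acc.1.get? nbr = none then (acc.1.insert nbr (s + 1), acc.2 ++ [nbr]) else acc)
      (R, nf) = (R, nf) := by
  induction ns with
  | nil => rfl
  | cons nbr tl ih =>
    have h1 := h nbr List.mem_cons_self
    have h2 : ¬ (R.get? nbr = none) := by
      intro he; rw [he] at h1; cases h1
    simp only [List.foldl_cons, h2, reduceIte]
    exact ih (fun x hx => h x (List.mem_cons_of_mem _ hx))

theorem pvBLevels_noop (arcs : List (Int × Int)) (m : Int) (node : Int) (R : PySem.Dict Int Int)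
    (hcov : 0 < m → ∀ nbr ∈ (pvBuildAdj arcs).getD node [], ∃ v, R.get? nbr = some v ∧ v ≤ 1) :
    pvBLevels (pvBuildAdj arcs) m.toNat 0 [node] R = R := by
  cases ht : m.toNat with
  | zero => rfl
  | succ t =>
    have hm : 0 < m := by omega
    rw [pvBLevels]
    simp only [reduceCtorEq, reduceIte, List.foldl_cons, List.foldl_nil]
    have hs : ∀ nbr ∈ (pvBuildAdj arcs).getD node [], (R.get? nbr).isSome := by
      intro nbr hn
      obtain ⟨v, hv, _⟩ := hcov hm nbr hn
      rw [hv]; rfl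
    have hnoop := pvBFold_noop 0 R ((pvBuildAdj arcs).getD node []) hs []
    rw [show pvBNode (pvBuildAdj arcs) 0 (R, []) node
        = ((pvBuildAdj arcs).getD node []).foldl
            (fun acc nbr => if acc.1.get? nbr = none then (acc.1.insert nbr (0 + 1), acc.2 ++ [nbr]) else acc)
            (R, []) from rfl]
    rw [hnoop]
    cases t <;> rfl

-- the completed run covers all neighbors of the source at distance ≤ 1
theorem pvRun_covers (arcs : List (Int × Int)) (m : Int) (node : Int) (hm : 0 < m) :
    ∀ nbr ∈ (pvBuildAdj arcs).getD node [], ∃ v, (pvRun arcs m node).get? nbr = some v ∧ v ≤ 1 := by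
  intro nbr hn
  obtain ⟨t, ht⟩ : ∃ t, m.toNat = t + 1 := ⟨m.toNat - 1, by omega⟩
  have hinv : pvInv ((PySem.Dict.empty : PySem.Dict Int Int).insert node 0) (0 + 1) := by
    intro k v h
    rw [PySem.Dict.get?_insert] at h
    split at h
    · cases h; omega
    · rw [PySem.Dict.get?_empty] at h; cases h
  obtain ⟨v, hv, hv1⟩ := pvBNodeFold_covers 0 ((pvBuildAdj arcs).getD node [])
    ((PySem.Dict.empty : PySem.Dict Int Int).insert node 0) [] hinv nbr hn
  refine ⟨v, ?_, by omega⟩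
  unfold pvRun
  rw [ht, pvBLevels]
  simp only [reduceCtorEq, reduceIte, List.foldl_cons, List.foldl_nil]
  exact pvBLevels_mono (pvBuildAdj arcs) t 1 _ _ nbr v hv

-- the outer loop over nodes
theorem pvOuter (arcs : List (Int × Int)) (m : Int) :
    ∀ (ns : List Int) (reach : PySem.Dict Int (PySem.Dict Int Int)),
    (∀ k dv, reach.get? k = some dv → dv = pvRun arcs m k) →
    ns.foldl (fun reach node =>
        reach.insert node (pvAStep (pvBuildAdj arcs) m (arcs.length + 2) [(node, 0)]
          ((reach.getD node PySem.Dict.empty).insert node 0))) reach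
    = ns.foldl (fun reach node =>
        reach.insert node (pvBLevels (pvBuildAdj arcs) m.toNat 0 [node]
          ((reach.getD node PySem.Dict.empty).insert node 0))) reach := by
  intro ns
  induction ns with
  | nil => intro reach _; rfl
  | cons node tl ih =>
    intro reach hinv
    simp only [List.foldl_cons]
    have hinv' : ∀ k dv, (reach.insert node (pvRun arcs m node)).get? k = some dv →
        dv = pvRun arcs m k := by
      intro k dv h
      rw [PySem.Dict.get?_insert] at h
      split at h
      · rename_i hk
        cases h
        rw [hk]
      · exact hinv k dv h
    cases h : reach.get? node with
    | none =>
      have hd0 : reach.getD node PySem.Dict.empty = PySem.Dict.empty :=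
        PySem.Dict.getD_of_get?_eq_none _ _ h
      rw [hd0, pvFresh_eq]
      exact ih _ hinv'
    | some R =>
      have hR : R = pvRun arcs m node := hinv node R h
      have hd0 : reach.getD node PySem.Dict.empty = R := by
        rw [PySem.Dict.getD_eq_get?_getD, h]; rfl
      have hR0 : R.get? node = some 0 := by rw [hR]; exact pvRun_get_node arcs m node
      have hRnd : R.keys.Nodup := by rw [hR]; exact pvRun_nodup arcs m node
      have hd1 : R.insert node 0 = R := pvInsert_same R node 0 hR0 hRnd
      have hcov : 0 < m → ∀ nbr ∈ (pvBuildAdj arcs).getD node [],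
          ∃ v, R.get? nbr = some v ∧ v ≤ 1 := by
        intro hm
        rw [hR]
        exact pvRun_covers arcs m node hm
      rw [hd0, hd1, pvAStep_noop arcs m node R hcov, pvBLevels_noop arcs m node R hcov]
      have hiR : ∀ k dv, (reach.insert node R).get? k = some dv → dv = pvRun arcs m k := by
        rw [hR]; exact hinv'
      exact ih _ hiR

-- ===== VERDICT (by name: the statement is the Claim_ definition above) =====
theorem compute_reachability_matrix_spec : Claim_equal_compute_reachability_matrix := by
  unfold Claim_equal_compute_reachability_matrix
  intro nodes arcs max_steps _
  unfold Spec_compute_reachability_matrix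
  unfold compute_reachability_matrix compute_reachability_matrix_alt
  simp only []
  rw [pvOuter arcs max_steps nodes PySem.Dict.empty
    (by intro k dv h; rw [PySem.Dict.get?_empty] at h; cases h)]
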